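-- pv_equiv track=rewrite | github.com/QuBenhao/LeetCode | problems/1269/solution.py | numWays
-- ===== SOURCE A (Python) =====
-- def numWays(steps, arrLen):
--     """
--     :type steps: int
--     :type arrLen: int
--     :rtype: int
--     """
--     # # 记忆化dfs
--     # @lru_cache(None)
--     # def dfs(cur, s):
--     #     if cur == -1 or cur == arrLen or cur > s:
--     #         return 0
--     #     if cur <= 1 and s == 1:
--     #         return 1
--     #     s -= 1
--     #     return dfs(cur, s) + dfs(cur - 1, s) + dfs(cur + 1, s)
--     #
--     # return dfs(0, steps) % (10 ** 9 + 7)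
--
--     # # 一维数组动态规划，自底向上滚动更新
--     # if arrLen == 1 or steps == 1:
--     #     return 1
--     # dp = [0] * (min(steps // 2 + 1, arrLen) + 2)
--     # n = len(dp)
--     # dp[1] = dp[2] = 1
--     # for i in range(1, steps):
--     #     nxt_dp = [0] * n
--     #     for j in range(1, min(n - 1, i + 3, steps - i + 1)):
--     #         nxt_dp[j] = dp[j-1] + dp[j] + dp[j+1]
--     #     dp = nxt_dp
--     # return dp[1] % (10 ** 9 + 7)
--
--     # 一维数组动态规划，自底向上滚动更新, 加入数学规律优化
--     if arrLen == 1 or steps == 1: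
--         return 1
--     dp = [0] * (min(steps // 2 + 1, arrLen) + 2)
--     n = len(dp)
--     dp[1] = dp[2] = 1
--     # 数学规律：对称性，只需要找到steps一半位置的dp的样子即可计算结果，因为后面往位置0递归算和从位置0递归算过来是一样的
--     for i in range(1, steps // 2):
--         nxt_dp = [0] * n
--         for j in range(1, min(n - 1, i + 3)):
--             nxt_dp[j] = dp[j-1] + dp[j] + dp[j+1]
--         dp = nxt_dp
--     # 偶数行是它的中心行的平方和
--     if steps % 2 == 0:
--         return sum(x**2 for x in dp) % (10 ** 9 + 7)
--     # 奇数行实际上是它中心两行的点乘结果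
--     return sum(dp[i] * (dp[i-1] + dp[i] + dp[i+1]) for i in range(1,len(dp)-1)) % (10 ** 9 + 7)
-- ===== SOURCE B (Python) =====
-- def numWays(steps, arrLen):
--     """
--     :type steps: int
--     :type arrLen: int
--     :rtype: int
--     """
--     if arrLen == 1 or steps == 1:
--         return 1
--     m = min(steps // 2 + 1, arrLen)
--     dp = [0] * (m + 2)
--     dp[1] = 1
--     for _ in range(steps):
--         dp = [0] + [dp[j - 1] + dp[j] + dp[j + 1] for j in range(1, m + 1)] + [0]
--     return dp[1] % (10 ** 9 + 7)
-- ===== Notes on version B (the rewrite author's own statement) =====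
-- stated objective: simpler
-- what changed: B replaces A's halfway-symmetry trick (run steps//2 transitions, then combine the middle row by a sum of squares or a dot product depending on parity) with the plain rolling DP: run all `steps` transitions over the same band and read off the origin cell dp[1].
-- intended difference: For steps == 0 and arrLen >= 2 A returns 2 (its sum-of-squares combine double-counts the unreached initial row) while B returns 1, the intended count: with zero moves there is exactly one way to stay at index 0. — e.g. on numWays(0, 2): A returns 2, B returns 1
import Mathlib
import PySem

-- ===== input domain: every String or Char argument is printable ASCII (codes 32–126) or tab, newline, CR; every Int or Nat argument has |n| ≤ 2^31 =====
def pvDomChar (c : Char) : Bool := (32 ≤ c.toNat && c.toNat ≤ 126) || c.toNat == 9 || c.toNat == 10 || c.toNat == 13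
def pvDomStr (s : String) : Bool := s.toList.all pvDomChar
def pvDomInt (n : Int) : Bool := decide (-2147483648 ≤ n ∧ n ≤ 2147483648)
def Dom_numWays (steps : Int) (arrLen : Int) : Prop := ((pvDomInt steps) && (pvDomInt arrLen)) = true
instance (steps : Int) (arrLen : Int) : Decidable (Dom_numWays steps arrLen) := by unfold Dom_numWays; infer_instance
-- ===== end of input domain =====

-- B replaces A's halfway-symmetry combine (half the transitions, then a sum of squares or a
-- dot product by parity) with the plain full-steps rolling DP read off at the origin cell.


-- ===== PORT A =====
-- the inner pass 'for j in range(1, min(n-1, i+3)): nxt_dp[j] = dp[j-1]+dp[j]+dp[j+1]'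
def innerA (dp : List Int) (n : Nat) (i : Int) : List Int :=
  (PySem.List.pyRange 1 (min ((n : Int) - 1) (i + 3)) 1).foldl
    (fun nxt j =>
      PySem.List.pySetD nxt j
        (PySem.List.pyGetD dp (j - 1) 0 + PySem.List.pyGetD dp j 0 + PySem.List.pyGetD dp (j + 1) 0))
    (List.replicate n 0)

def numWays (steps : Int) (arrLen : Int) : Int :=
  if arrLen = 1 ∨ steps = 1 then 1
  else
    let n : Nat := (min (PySem.Int.floordiv steps 2 + 1) arrLen + 2).toNat
    let dp0 : List Int :=
      PySem.List.pySetD (PySem.List.pySetD (List.replicate n 0) 1 1) 2 1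
    let dp : List Int :=
      (PySem.List.pyRange 1 (PySem.Int.floordiv steps 2) 1).foldl (fun d i => innerA d n i) dp0
    if PySem.Int.mod steps 2 = 0 then
      PySem.Int.mod (dp.foldl (fun acc x => acc + x ^ 2) 0) (10 ^ 9 + 7)
    else
      PySem.Int.mod
        ((PySem.List.pyRange 1 ((n : Int) - 1) 1).foldl
          (fun acc i =>
            acc + PySem.List.pyGetD dp i 0 *
              (PySem.List.pyGetD dp (i - 1) 0 + PySem.List.pyGetD dp i 0 +
                PySem.List.pyGetD dp (i + 1) 0)) 0)
        (10 ^ 9 + 7)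

-- ===== PORT B =====
-- one full-band transition: dp = [0] + [dp[j-1]+dp[j]+dp[j+1] for j in range(1, m+1)] + [0]
def bodyB (m : Int) (dp : List Int) : List Int :=
  0 :: (((PySem.List.pyRange 1 (m + 1) 1).map
    (fun j =>
      PySem.List.pyGetD dp (j - 1) 0 + PySem.List.pyGetD dp j 0 + PySem.List.pyGetD dp (j + 1) 0))
    ++ [0])

def numWays_alt (steps : Int) (arrLen : Int) : Int :=
  if arrLen = 1 ∨ steps = 1 then 1
  else
    let m : Int := min (PySem.Int.floordiv steps 2 + 1) arrLen
    let dp0 : List Int := PySem.List.pySetD (List.replicate (m + 2).toNat 0) 1 1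
    let dp : List Int := (PySem.List.pyRange 0 steps 1).foldl (fun d _ => bodyB m d) dp0
    PySem.Int.mod (PySem.List.pyGetD dp 1 0) (10 ^ 9 + 7)

-- ===== PRECONDITION & SPEC =====
-- Pre_ excludes exactly the inputs on which A raises IndexError: unless the arrLen == 1 or
-- steps == 1 shortcut fires, A needs steps >= 0 and arrLen >= 1 for its dp array to have the
-- two cells dp[1] = dp[2] = 1 writes.
def Pre_numWays (steps : Int) (arrLen : Int) : Prop :=
  arrLen = 1 ∨ steps = 1 ∨ (0 ≤ steps ∧ 1 ≤ arrLen)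
instance (steps : Int) (arrLen : Int) : Decidable (Pre_numWays steps arrLen) := by
  unfold Pre_numWays; infer_instance
def pvWitness_numWays : Int × Int := (4, 3)

-- For steps == 0 and arrLen >= 2 A returns 2 (its sum-of-squares combine counts the two ones of
-- its seed row, which already encodes one move) while B returns 1, the intended count: with zero
-- moves there is exactly one way to stay at index 0.
def D_numWays (steps : Int) (arrLen : Int) : Prop := steps = 0 ∧ 2 ≤ arrLen
instance (steps : Int) (arrLen : Int) : Decidable (D_numWays steps arrLen) := by
  unfold D_numWays; infer_instance

def Spec_numWays (steps : Int) (arrLen : Int) (out : Int) : Prop :=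
  ¬ D_numWays steps arrLen → out = numWays_alt steps arrLen
instance (steps : Int) (arrLen : Int) (out : Int) : Decidable (Spec_numWays steps arrLen out) := by
  unfold Spec_numWays; infer_instance

def pvDiffWitness_numWays : Int × Int := (0, 2)
def pvDiffWitnessOut_numWays : Int × Int := (2, 1)

-- ===== CLAIM (what is proved, stated in full; the proofs are below) =====
def Claim_unchanged_numWays : Prop := ∀ (steps : Int) (arrLen : Int), Dom_numWays steps arrLen → Pre_numWays steps arrLen → Spec_numWays steps arrLen (numWays steps arrLen)
def Claim_changed_numWays : Prop := Dom_numWays (pvDiffWitness_numWays.1) (pvDiffWitness_numWays.2) ∧ Pre_numWays (pvDiffWitness_numWays.1) (pvDiffWitness_numWays.2) ∧ D_numWays (pvDiffWitness_numWays.1) (pvDiffWitness_numWays.2) ∧ numWays (pvDiffWitness_numWays.1) (pvDiffWitness_numWays.2) = pvDiffWitnessOut_numWays.1 ∧ numWays_alt (pvDiffWitness_numWays.1) (pvDiffWitness_numWays.2) = pvDiffWitnessOut_numWays.2 ∧ pvDiffWitnessOut_numWays.1 ≠ pvDiffWitnessOut_numWays.2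
def Claim_exact_numWays : Prop := ∀ (steps : Int) (arrLen : Int), Dom_numWays steps arrLen → Pre_numWays steps arrLen → D_numWays steps arrLen → numWays steps arrLen ≠ numWays_alt steps arrLen

-- ===== LEMMAS AND PROOFS =====
-- Abstract model: `row m t p` is the banded DP value after t transitions at position p
-- (band = positions 0 .. m-1, zero outside); `dot` is the inner product over the band.
-- A's halfway combine equals B's full run because the transition is self-adjoint for `dot`.

def rstep (m : Int) (u : Int → Int) : Int → Int :=
  fun p => if 0 ≤ p ∧ p < m then u (p - 1) + u p + u (p + 1) else 0

def row (m : Int) : Nat → Int → Int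
  | 0 => fun p => if p = 0 then 1 else 0
  | t + 1 => rstep m (row m t)

def dot (m : Int) (u v : Int → Int) : Int :=
  ∑ j ∈ Finset.range m.toNat, u (j : Int) * v (j : Int)

theorem row_vanish (m : Int) (hm : 1 ≤ m) :
    ∀ (t : Nat) (p : Int), p < 0 ∨ m ≤ p → row m t p = 0 := by
  intro t p hp
  cases t with
  | zero => simp only [row]; split <;> omega
  | succ t => simp only [row, rstep]; split <;> [omega; rfl]

theorem row_support (m : Int) : ∀ (t : Nat) (p : Int), (t : Int) < p → row m t p = 0 := by
  intro t
  induction t with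
  | zero => intro p hp; simp only [row]; split <;> omega
  | succ t ih =>
    intro p hp
    simp only [row, rstep]
    split
    · push_cast at hp
      rw [ih (p-1) (by omega), ih p (by omega), ih (p+1) (by omega)]; ring
    · rfl

theorem sum_shift (m : Int) (hm : 1 ≤ m) (u v : Int → Int) (hu : u (-1) = 0) (hv : v m = 0) :
    ∑ j ∈ Finset.range m.toNat, u ((j : Int) - 1) * v (j : Int)
      = ∑ j ∈ Finset.range m.toNat, u (j : Int) * v ((j : Int) + 1) := by
  obtain ⟨M, hM⟩ : ∃ M, m.toNat = M + 1 := ⟨m.toNat - 1, by omega⟩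
  have hmM : ((M : Int) + 1) = m := by omega
  rw [hM, Finset.sum_range_succ' (fun j => u ((j : Int) - 1) * v (j : Int)),
      Finset.sum_range_succ]
  push_cast
  simp only [add_sub_cancel_right, hmM, hu, hv, mul_zero, zero_mul, add_zero]

theorem dot_adj (m : Int) (hm : 1 ≤ m) (u v : Int → Int)
    (hu : ∀ p, p < 0 ∨ m ≤ p → u p = 0) (hv : ∀ p, p < 0 ∨ m ≤ p → v p = 0) :
    dot m (rstep m u) v = dot m u (rstep m v) := by
  have hguard : ∀ j ∈ Finset.range m.toNat, (0 ≤ (j:Int) ∧ (j:Int) < m) := by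
    intro j hj; simp only [Finset.mem_range] at hj; omega
  unfold dot
  calc ∑ j ∈ Finset.range m.toNat, rstep m u (j:Int) * v (j:Int)
      = ∑ j ∈ Finset.range m.toNat,
          (u ((j:Int)-1) * v (j:Int) + u (j:Int) * v (j:Int) + u ((j:Int)+1) * v (j:Int)) := by
        refine Finset.sum_congr rfl fun j hj => ?_
        rw [rstep, if_pos (hguard j hj)]; ring
    _ = ∑ j ∈ Finset.range m.toNat,
          (u (j:Int) * v ((j:Int)+1) + u (j:Int) * v (j:Int) + u (j:Int) * v ((j:Int)-1)) := by
        simp only [Finset.sum_add_distrib]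
        rw [sum_shift m hm u v (hu _ (by omega)) (hv _ (by omega))]
        have h2 : ∑ j ∈ Finset.range m.toNat, u ((j:Int)+1) * v (j:Int)
            = ∑ j ∈ Finset.range m.toNat, u (j:Int) * v ((j:Int)-1) := by
          have := sum_shift m hm v u (hv _ (by omega)) (hu _ (by omega))
          calc ∑ j ∈ Finset.range m.toNat, u ((j:Int)+1) * v (j:Int)
              = ∑ j ∈ Finset.range m.toNat, v (j:Int) * u ((j:Int)+1) := by
                refine Finset.sum_congr rfl fun j _ => mul_comm _ _
            _ = ∑ j ∈ Finset.range m.toNat, v ((j:Int)-1) * u (j:Int) := this.symm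
            _ = ∑ j ∈ Finset.range m.toNat, u (j:Int) * v ((j:Int)-1) := by
                refine Finset.sum_congr rfl fun j _ => mul_comm _ _
        rw [h2]
    _ = ∑ j ∈ Finset.range m.toNat, u (j:Int) * rstep m v (j:Int) := by
        refine Finset.sum_congr rfl fun j hj => ?_
        rw [rstep, if_pos (hguard j hj)]; ring

theorem dot_row_exchange (m : Int) (hm : 1 ≤ m) :
    ∀ (k a b : Nat), dot m (row m (a + k)) (row m b) = dot m (row m a) (row m (b + k)) := by
  intro k
  induction k with
  | zero => intro a b; rfl
  | succ k ih =>
    intro a b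
    have h1 : a + (k + 1) = (a + k) + 1 := by omega
    rw [h1]
    have : row m ((a + k) + 1) = rstep m (row m (a + k)) := rfl
    rw [this, dot_adj m hm _ _ (row_vanish m hm _) (row_vanish m hm _)]
    have : rstep m (row m b) = row m (b + 1) := rfl
    rw [this]
    rw [ih a (b + 1)]
    have hbk : b + 1 + k = b + (k + 1) := by omega
    rw [hbk]

theorem dot_row_zero (m : Int) (hm : 1 ≤ m) (t : Nat) :
    dot m (row m t) (row m 0) = row m t 0 := by
  unfold dot
  rw [Finset.sum_eq_single_of_mem 0 (by simp; omega)]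
  · simp [row]
  · intro b _ hb
    have : ¬ ((b : Int) = 0) := by exact_mod_cast hb
    simp only [row]
    rw [if_neg this, mul_zero]

theorem row_add_eq_dot (m : Int) (hm : 1 ≤ m) (a b : Nat) :
    row m (a + b) 0 = dot m (row m a) (row m b) := by
  rw [← dot_row_zero m hm (a + b), dot_row_exchange m hm b a 0, Nat.zero_add]

-- ===== bridge to the ports' lists =====
def rowList (m : Int) (t : Nat) : List Int :=
  (List.range (m + 2).toNat).map (fun (j : Nat) => row m t ((j : Int) - 1))

theorem length_rowList (m : Int) (t : Nat) : (rowList m t).length = (m + 2).toNat := by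
  simp [rowList]

theorem pyGetD_nonneg_getD (xs : List Int) (i : Int) (h : 0 ≤ i) (d : Int) :
    PySem.List.pyGetD xs i d = xs.getD i.toNat d := by
  have hi : i = ((i.toNat : Nat) : Int) := by omega
  conv_lhs => rw [hi]
  rw [PySem.List.pyGetD_natCast]

theorem getD_rowList (m : Int) (hm : 1 ≤ m) (t : Nat) (j : Int) (hj : 0 ≤ j) :
    PySem.List.pyGetD (rowList m t) j 0 = row m t (j - 1) := by
  rw [pyGetD_nonneg_getD _ _ hj]
  by_cases h : j < m + 2
  · have hjl : j.toNat < (rowList m t).length := by rw [length_rowList]; omega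
    rw [List.getD_eq_getElem _ _ hjl]
    simp only [rowList]
    rw [List.getElem_map, List.getElem_range]
    congr 1
    omega
  · rw [List.getD_eq_default _ _ (by rw [length_rowList]; omega),
        row_vanish m hm t (j - 1) (by omega)]

theorem list_eq_of_getD (xs ys : List Int) (hl : xs.length = ys.length)
    (h : ∀ k : Nat, k < xs.length → xs.getD k 0 = ys.getD k 0) : xs = ys := by
  apply List.ext_getElem hl
  intro k h1 h2
  have := h k h1
  rwa [List.getD_eq_getElem _ _ h1, List.getD_eq_getElem _ _ h2] at this

theorem getD_rowList_nat (m : Int) (t : Nat) (k : Nat) (hk : k < (m + 2).toNat) :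
    (rowList m t).getD k 0 = row m t ((k : Int) - 1) := by
  rw [List.getD_eq_getElem _ _ (by rw [length_rowList]; omega)]
  simp only [rowList]
  rw [List.getElem_map, List.getElem_range]

theorem foldl_pySetD_spec (f : Int → Int) :
    ∀ (c : Nat) (a : Int), 0 ≤ a → ∀ (init : List Int),
      ((PySem.List.pyRange a (a + c) 1).foldl
          (fun acc j => PySem.List.pySetD acc j (f j)) init).length = init.length ∧
      ∀ (k : Nat),
        ((PySem.List.pyRange a (a + c) 1).foldl
            (fun acc j => PySem.List.pySetD acc j (f j)) init).getD k 0 =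
          if a ≤ (k : Int) ∧ (k : Int) < a + c ∧ k < init.length then f k else init.getD k 0 := by
  intro c
  induction c with
  | zero =>
    intro a ha init
    rw [PySem.List.pyRange_one_eq_nil (by omega)]
    refine ⟨rfl, fun k => ?_⟩
    rw [if_neg (by omega)]
    rfl
  | succ c ih =>
    intro a ha init
    rw [PySem.List.pyRange_one_cons (by omega)]
    simp only [List.foldl_cons]
    rw [PySem.List.pySetD_of_nonneg _ _ ha]
    have hb : a + ((c : Nat) + 1 : Nat) = (a + 1) + (c : Nat) := by push_cast; ring
    rw [hb]
    obtain ⟨ihl, ihg⟩ := ih (a + 1) (by omega) (init.set a.toNat (f a))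
    refine ⟨by rw [ihl, List.length_set], fun k => ?_⟩
    rw [ihg k, List.length_set]
    by_cases h1 : a + 1 ≤ (k : Int) ∧ (k : Int) < a + 1 + c ∧ k < init.length
    · rw [if_pos h1, if_pos (by omega)]
    · rw [if_neg h1]
      by_cases h2 : (k : Int) = a ∧ k < init.length
      · rw [if_pos (by omega)]
        have hv : (init.set a.toNat (f a)).getD k 0 = f a := by
          rw [List.getD_eq_getElem _ _ (by rw [List.length_set]; omega)]
          have hka : k = a.toNat := by omega
          subst hka
          exact List.getElem_set_self (h := by simp only [List.length_set]; omega)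
        rw [hv]
        congr 1
        omega
      · rw [if_neg (by omega)]
        by_cases h3 : k < init.length
        · rw [List.getD_eq_getElem _ _ (by rw [List.length_set]; omega),
              List.getD_eq_getElem _ _ h3,
              List.getElem_set_ne (h := by omega) (by simp only [List.length_set]; omega)]
        · rw [List.getD_eq_default _ _ (by rw [List.length_set]; omega),
              List.getD_eq_default _ _ (by omega)]

theorem row_one (m : Int) (hm : 2 ≤ m) (p : Int) :
    row m 1 p = if p = 0 ∨ p = 1 then 1 else 0 := by
  simp only [row, rstep]
  split_ifs <;> omega

theorem initA (m : Int) (hm : 2 ≤ m) :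
    PySem.List.pySetD (PySem.List.pySetD (List.replicate (m + 2).toNat 0) 1 1) 2 1
      = rowList m 1 := by
  apply list_eq_of_getD
  · rw [PySem.List.length_pySetD, PySem.List.length_pySetD, List.length_replicate, length_rowList]
  · intro k hk
    have hk' : k < (m + 2).toNat := by
      rwa [PySem.List.length_pySetD, PySem.List.length_pySetD, List.length_replicate] at hk
    rw [getD_rowList_nat m 1 k hk', row_one m hm]
    rw [PySem.List.pySetD_of_nonneg _ _ (by norm_num), PySem.List.pySetD_of_nonneg _ _ (by norm_num),
        show ((1 : Int).toNat) = 1 from rfl, show ((2 : Int).toNat) = 2 from rfl]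
    rw [List.getD_eq_getElem _ _ (by simp only [List.length_set, List.length_replicate]; omega)]
    by_cases h2 : k = 2
    · subst h2
      rw [List.getElem_set_self (h := by simp only [List.length_set, List.length_replicate]; omega)]
      rw [if_pos (by norm_num)]
    · rw [List.getElem_set_ne (h := by omega)
        (by simp only [List.length_set, List.length_replicate]; omega)]
      by_cases h1 : k = 1
      · subst h1
        rw [List.getElem_set_self (h := by simp only [List.length_set, List.length_replicate]; omega)]
        rw [if_pos (by norm_num)]
      · rw [List.getElem_set_ne (h := by omega)
          (by simp only [List.length_set, List.length_replicate]; omega),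
          List.getElem_replicate, if_neg (by omega)]

theorem initB (m : Int) :
    PySem.List.pySetD (List.replicate (m + 2).toNat 0) 1 1 = rowList m 0 := by
  apply list_eq_of_getD
  · rw [PySem.List.length_pySetD, List.length_replicate, length_rowList]
  · intro k hk
    have hk' : k < (m + 2).toNat := by
      rwa [PySem.List.length_pySetD, List.length_replicate] at hk
    rw [getD_rowList_nat m 0 k hk']
    simp only [row]
    rw [PySem.List.pySetD_of_nonneg _ _ (by norm_num), show ((1 : Int).toNat) = 1 from rfl]
    rw [List.getD_eq_getElem _ _ (by simp only [List.length_set, List.length_replicate]; omega)]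
    by_cases h1 : k = 1
    · subst h1
      rw [List.getElem_set_self (h := by simp only [List.length_set, List.length_replicate]; omega)]
      rw [if_pos (by norm_num)]
    · rw [List.getElem_set_ne (h := by omega)
        (by simp only [List.length_set, List.length_replicate]; omega),
        List.getElem_replicate, if_neg (by omega)]

theorem innerA_rowList (m : Int) (hm : 2 ≤ m) (t : Nat) (i : Int) (ht : (t : Int) ≤ i) :
    innerA (rowList m t) (m + 2).toNat i = rowList m (t + 1) := by
  unfold innerA
  have hn : ((((m + 2).toNat : Nat)) : Int) = m + 2 := by omega
  rw [hn]
  have hKge : (1 : Int) ≤ min (m + 2 - 1) (i + 3) := by omega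
  rw [show min (m + 2 - 1) (i + 3) = 1 + (((min (m + 2 - 1) (i + 3) - 1).toNat : Nat) : Int) by omega]
  obtain ⟨hl, hg⟩ := foldl_pySetD_spec
    (fun j => PySem.List.pyGetD (rowList m t) (j - 1) 0 + PySem.List.pyGetD (rowList m t) j 0 +
      PySem.List.pyGetD (rowList m t) (j + 1) 0)
    ((min (m + 2 - 1) (i + 3) - 1).toNat) 1 (by norm_num) (List.replicate (m + 2).toNat 0)
  apply list_eq_of_getD
  · rw [hl, List.length_replicate, length_rowList]
  · intro k hk
    have hk' : k < (m + 2).toNat := by rwa [hl, List.length_replicate] at hk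
    rw [hg k, getD_rowList_nat m (t + 1) k hk']
    have hKm : (1 : Int) + ((min (m + 2 - 1) (i + 3) - 1).toNat : Int) = min (m + 1) (i + 3) := by
      omega
    rw [hKm]
    by_cases h : 1 ≤ (k : Int) ∧ (k : Int) < min (m + 1) (i + 3)
    · rw [if_pos (by refine ⟨by omega, by omega, ?_⟩; rw [List.length_replicate]; omega)]
      rw [getD_rowList m (by omega) t ((k : Int) - 1) (by omega),
          getD_rowList m (by omega) t (k : Int) (by omega),
          getD_rowList m (by omega) t ((k : Int) + 1) (by omega)]
      simp only [row, rstep]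
      rw [if_pos (by omega)]
      rw [show (k : Int) - 1 - 1 = (k : Int) - 2 by ring, show (k : Int) - 1 + 1 = (k : Int) by ring,
          show (k : Int) + 1 - 1 = (k : Int) by ring]
    · rw [if_neg (by rw [List.length_replicate]; omega)]
      rw [List.getD_eq_getElem _ _ (by rw [List.length_replicate]; exact hk'), List.getElem_replicate]
      by_cases h0 : k = 0
      · subst h0
        simp only [row, rstep]
        rw [if_neg (by omega)]
      · by_cases hv : m + 1 ≤ (k : Int)
        · rw [row_vanish m (by omega) (t + 1) ((k : Int) - 1) (by omega)]
        · rw [row_support m (t + 1) ((k : Int) - 1) (by push_cast; omega)]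

theorem bodyB_rowList (m : Int) (hm : 2 ≤ m) (t : Nat) :
    bodyB m (rowList m t) = rowList m (t + 1) := by
  unfold bodyB
  have hlen : ((PySem.List.pyRange 1 (m + 1) 1).map
      (fun j =>
        PySem.List.pyGetD (rowList m t) (j - 1) 0 + PySem.List.pyGetD (rowList m t) j 0 +
          PySem.List.pyGetD (rowList m t) (j + 1) 0)).length = m.toNat := by
    rw [List.length_map, PySem.List.length_pyRange_one]
    omega
  apply list_eq_of_getD
  · simp only [List.length_cons, List.length_append, hlen, List.length_nil, length_rowList]
    omega
  · intro k hk
    have hk' : k < (m + 2).toNat := by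
      simp only [List.length_cons, List.length_append, hlen, List.length_nil] at hk
      omega
    rw [getD_rowList_nat m (t + 1) k hk']
    cases k with
    | zero =>
      rw [List.getD_cons_zero]
      simp only [row, rstep]
      rw [if_neg (by omega)]
    | succ j =>
      rw [List.getD_cons_succ]
      by_cases hj : j < m.toNat
      · rw [List.getD_append _ _ _ _ (by rw [hlen]; omega)]
        rw [List.getD_eq_getElem _ _ (by rw [hlen]; omega), List.getElem_map,
            PySem.List.getElem_pyRange_one]
        rw [getD_rowList m (by omega) t (1 + (j : Int) - 1) (by omega),
            getD_rowList m (by omega) t (1 + (j : Int)) (by omega),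
            getD_rowList m (by omega) t (1 + (j : Int) + 1) (by omega)]
        simp only [row, rstep]
        rw [if_pos (by push_cast; omega)]
        rw [show (1 : Int) + (j : Int) - 1 - 1 = ((j + 1 : Nat) : Int) - 1 - 1 by push_cast; ring,
            show (1 : Int) + (j : Int) - 1 = ((j + 1 : Nat) : Int) - 1 by push_cast; ring,
            show (1 : Int) + (j : Int) + 1 - 1 = ((j + 1 : Nat) : Int) - 1 + 1 by push_cast; ring]
      · rw [List.getD_append_right _ _ _ _ (by rw [hlen]; omega)]
        rw [hlen, show j - m.toNat = 0 by omega, List.getD_cons_zero]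
        simp only [row, rstep]
        rw [if_neg (by push_cast; omega)]

theorem sum_map_range_eq (n : Nat) (f : Nat → Int) :
    ((List.range n).map f).sum = ∑ i ∈ Finset.range n, f i := by
  induction n with
  | zero => simp
  | succ k ih =>
    rw [List.range_succ, Finset.sum_range_succ, List.map_append, List.sum_append, ih]
    simp

theorem loopA (m : Int) (hm : 2 ≤ m) :
    ∀ (c t : Nat), 1 ≤ t →
      (PySem.List.pyRange (t : Int) ((t : Int) + (c : Int)) 1).foldl
        (fun d i => innerA d (m + 2).toNat i) (rowList m t) = rowList m (t + c) := by
  intro c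
  induction c with
  | zero =>
    intro t ht
    rw [show (t : Int) + ((0 : Nat) : Int) = (t : Int) by push_cast; ring,
        PySem.List.pyRange_one_eq_nil le_rfl]
    rfl
  | succ c ih =>
    intro t ht
    rw [PySem.List.pyRange_one_cons (by push_cast; omega)]
    simp only [List.foldl_cons]
    rw [innerA_rowList m hm t (t : Int) le_rfl]
    rw [show (t : Int) + 1 = ((t + 1 : Nat) : Int) by push_cast; ring,
        show (t : Int) + ((c + 1 : Nat) : Int) = ((t + 1 : Nat) : Int) + ((c : Nat) : Int) by
          push_cast; ring]
    rw [ih (t + 1) (by omega)]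
    congr 1
    omega

theorem loopB (m : Int) (hm : 2 ≤ m) :
    ∀ (l : List Int) (t : Nat),
      l.foldl (fun d _ => bodyB m d) (rowList m t) = rowList m (t + l.length) := by
  intro l
  induction l with
  | nil => intro t; rfl
  | cons x xs ih =>
    intro t
    simp only [List.foldl_cons]
    rw [bodyB_rowList m hm t, ih (t + 1)]
    congr 1
    simp only [List.length_cons]
    omega

theorem evenSum (m : Int) (hm : 2 ≤ m) (h : Nat) :
    (rowList m h).foldl (fun acc x => acc + x ^ 2) 0 = dot m (row m h) (row m h) := by
  rw [PySem.List.foldl_add (rowList m h) (fun x => x ^ 2) 0, zero_add]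
  unfold rowList
  rw [List.map_map]
  rw [show (m + 2).toNat = (m.toNat + 1) + 1 by omega, sum_map_range_eq]
  rw [Finset.sum_range_succ, Finset.sum_range_succ']
  simp only [Function.comp_apply]
  rw [row_vanish m (by omega) h (((m.toNat + 1 : Nat) : Int) - 1) (by omega)]
  rw [show ((0 : Nat) : Int) - 1 = -1 by norm_num, row_vanish m (by omega) h (-1) (by omega)]
  norm_num
  unfold dot
  apply Finset.sum_congr rfl
  intro j hj
  ring

theorem oddSum (m : Int) (hm : 2 ≤ m) (h : Nat) :
    (PySem.List.pyRange 1 ((((m + 2).toNat : Nat) : Int) - 1) 1).foldl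
      (fun acc i => acc + PySem.List.pyGetD (rowList m h) i 0 *
        (PySem.List.pyGetD (rowList m h) (i - 1) 0 + PySem.List.pyGetD (rowList m h) i 0 +
          PySem.List.pyGetD (rowList m h) (i + 1) 0)) 0
      = dot m (row m h) (row m (h + 1)) := by
  rw [PySem.List.foldl_add _ (fun i => PySem.List.pyGetD (rowList m h) i 0 *
        (PySem.List.pyGetD (rowList m h) (i - 1) 0 + PySem.List.pyGetD (rowList m h) i 0 +
          PySem.List.pyGetD (rowList m h) (i + 1) 0)) 0, zero_add]
  rw [show (((m + 2).toNat : Nat) : Int) - 1 = m + 1 by omega]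
  rw [PySem.List.pyRange_one 1 (m + 1), List.map_map]
  rw [show (m + 1 - 1).toNat = m.toNat by omega, sum_map_range_eq]
  unfold dot
  apply Finset.sum_congr rfl
  intro j hj
  have hjm : (j : Int) < m := by rw [Finset.mem_range] at hj; omega
  simp only [Function.comp_apply]
  rw [getD_rowList m (by omega) h (1 + (j : Int)) (by omega),
      getD_rowList m (by omega) h (1 + (j : Int) - 1) (by omega),
      getD_rowList m (by omega) h (1 + (j : Int) + 1) (by omega)]
  rw [show (1 : Int) + (j : Int) - 1 = (j : Int) by ring,
      show (1 : Int) + (j : Int) + 1 - 1 = (j : Int) + 1 by ring]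
  rw [show row m (h + 1) (j : Int)
        = row m h ((j : Int) - 1) + row m h (j : Int) + row m h ((j : Int) + 1) from by
      simp only [row, rstep]; rw [if_pos ⟨by omega, hjm⟩]]

theorem main_eq (steps arrLen : Int) (hs : 2 ≤ steps) (ha : 2 ≤ arrLen) :
    numWays steps arrLen = numWays_alt steps arrLen := by
  have hbr : ¬(arrLen = 1 ∨ steps = 1) := by omega
  simp only [numWays, numWays_alt, if_neg hbr]
  rw [PySem.Int.floordiv_eq_ediv_of_pos (by norm_num : (0:Int) < 2),
      PySem.Int.mod_eq_emod_of_pos (by norm_num : (0:Int) < 2)]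
  set m := min (steps / 2 + 1) arrLen with hmdef
  have hm : 2 ≤ m := by omega
  rw [initA m hm, initB m]
  -- A loop
  have hA := loopA m hm (steps / 2 - 1).toNat 1 le_rfl
  simp only [Nat.cast_one] at hA
  rw [show steps / 2 = (1 : Int) + (((steps / 2 - 1).toNat : Nat) : Int) by omega, hA]
  -- B loop
  rw [loopB m hm (PySem.List.pyRange 0 steps 1) 0, PySem.List.length_pyRange_one]
  rw [getD_rowList m (by omega) _ 1 (by norm_num)]
  rw [show (1 : Int) - 1 = 0 by ring]
  rw [show (0 : Nat) + (steps - 0).toNat = steps.toNat by omega]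
  rw [show (1 : Nat) + (steps / 2 - 1).toNat = (steps / 2).toNat by omega]
  by_cases hpar : steps % 2 = 0
  · rw [if_pos hpar, evenSum m hm (steps / 2).toNat, ← row_add_eq_dot m (by omega)]
    rw [show (steps / 2).toNat + (steps / 2).toNat = steps.toNat by omega]
  · rw [if_neg hpar, oddSum m hm (steps / 2).toNat, ← row_add_eq_dot m (by omega)]
    rw [show (steps / 2).toNat + ((steps / 2).toNat + 1) = steps.toNat by omega]

-- ===== VERDICT (by name: the statement is the Claim_ definition above) =====
theorem numWays_spec : Claim_unchanged_numWays := by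
  intro steps arrLen hDom hPre hnD
  by_cases hbr : arrLen = 1 ∨ steps = 1
  · simp only [numWays, numWays_alt, if_pos hbr]
  · unfold Pre_numWays at hPre
    unfold D_numWays at hnD
    exact main_eq steps arrLen (by omega) (by omega)

theorem numWays_changed : Claim_changed_numWays := by
  unfold Claim_changed_numWays; decide

theorem numWays_tight : Claim_exact_numWays := by
  intro steps arrLen hDom hPre hD
  have hD' : steps = 0 ∧ 2 ≤ arrLen := hD
  obtain ⟨h0, h2⟩ := hD'
  subst h0
  have hbr : ¬(arrLen = 1 ∨ (0 : Int) = 1) := by omega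
  have hA : numWays 0 arrLen = 2 := by
    simp only [numWays, if_neg hbr]
    rw [show PySem.Int.floordiv 0 2 = 0 from rfl, show min ((0 : Int) + 1) arrLen = 1 by omega]
    rfl
  have hB : numWays_alt 0 arrLen = 1 := by
    simp only [numWays_alt, if_neg hbr]
    rw [show PySem.Int.floordiv 0 2 = 0 from rfl, show min ((0 : Int) + 1) arrLen = 1 by omega]
    rfl
  rw [hA, hB]
  decide
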